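-- pv_equiv track=rewrite | github.com/SubhPB/leet-code | src/app/2026/contests/C493.py | maxActivated
-- ===== SOURCE A (Python) =====
-- def maxActivated(points: list[list[int]]) -> int:
--     n=len(points); parent=[-1]*n
--     points.sort(key= lambda p: p[0])
--     idy={points[0][1]:0}
--     def find(a:int):
--         p=a
--         while parent[p]>=0: p=parent[p]
--         if a!=p: parent[a]=p
--         return p
--     def union(a:int,b:int):
--         pa=find(a);pb=find(b)
--         sa=parent[pa]; sb=parent[pb]
--         if pa!=pb:
--             if sa<=sb:
--                 parent[pa]+=parent[pb]
--                 parent[pb]=pa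
--             else:
--                 parent[pb]+=parent[pa]
--                 parent[pa]=pb
--             return True
--         return False
--     for i in range(1,n):
--         [x,y]=points[i]
--         if points[i-1][0]==x:
--             union(i-1,i)
--         if y in idy: union(idy[y],i)
--         else: idy[y]=i
--     a=0;b=0
--     for i in range(n):
--         [a,b,_]=sorted([a,b,parent[i]])
--     return abs(a+b)+1
-- ===== SOURCE B (Python) =====
-- def maxActivated(points: list[list[int]]) -> int:
--     points.sort(key=lambda p: p[0])  # keep A's observable in-place sort
--     n = len(points)
--     comp = list(range(n))            # component label of each index
--     first_y = {points[0][1]: 0}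
--     for i in range(1, n):
--         x, y = points[i]
--         if points[i - 1][0] == x and comp[i - 1] != comp[i]:
--             dst, src = comp[i - 1], comp[i]
--             comp = [dst if c == src else c for c in comp]
--         j = first_y.get(y)
--         if j is None:
--             first_y[y] = i
--         elif comp[j] != comp[i]:
--             dst, src = comp[j], comp[i]
--             comp = [dst if c == src else c for c in comp]
--     sizes = {}
--     for c in comp:
--         sizes[c] = sizes.get(c, 0) + 1
--     s1 = s2 = 0
--     for s in sizes.values():
--         if s > s1:
--             s1, s2 = s, s1
--         elif s > s2:
--             s2 = s
--     return s1 + s2 + 1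
-- ===== Notes on version B (the rewrite author's own statement) =====
-- stated objective: alternative
-- what changed: Replaces A's size-balanced union-find forest (parent array with negative-size roots, find loop with path compression) by direct component labels that are relabelled on each merge, and A's sorted-triple two-minimum fold over the parent array by a counting dict plus a two-maximum scan of the component sizes.
import Mathlib
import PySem

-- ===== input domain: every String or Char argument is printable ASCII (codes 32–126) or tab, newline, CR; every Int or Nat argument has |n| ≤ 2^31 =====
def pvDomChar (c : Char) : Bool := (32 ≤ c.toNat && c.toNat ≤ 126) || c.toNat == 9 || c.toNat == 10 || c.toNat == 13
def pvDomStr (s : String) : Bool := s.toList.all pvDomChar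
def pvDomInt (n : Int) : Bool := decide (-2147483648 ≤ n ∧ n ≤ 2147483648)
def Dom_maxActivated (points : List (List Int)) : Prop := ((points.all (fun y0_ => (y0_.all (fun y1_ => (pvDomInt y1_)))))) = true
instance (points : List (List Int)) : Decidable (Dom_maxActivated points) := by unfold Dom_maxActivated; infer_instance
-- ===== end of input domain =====

-- B replaces A's size-balanced union-find forest by direct component labels relabelled on each
-- merge and a counting dict for the two largest components ('alternative', not faster); both
-- Pythons sort `points` in place, and the equivalence proved is about the return value.

-- ===== PORT A =====
-- while parent[p] >= 0: p = parent[p]   (fuel; on the forests A builds, fuel = len(parent) always suffices)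
def pvChase (parent : List Int) : Nat → Int → Int
  | 0, p => p
  | f+1, p =>
      if 0 ≤ PySem.List.pyGetD parent p 0 then pvChase parent f (PySem.List.pyGetD parent p 0) else p

def pvFind (parent : List Int) (a : Int) : List Int × Int :=
  let p := pvChase parent parent.length a
  (if a ≠ p then PySem.List.pySetD parent a p else parent, p)

def pvUnion (parent : List Int) (a b : Int) : List Int :=
  let r1 := pvFind parent a
  let r2 := pvFind r1.1 b
  let parent2 := r2.1
  let pa := r1.2
  let pb := r2.2
  let sa := PySem.List.pyGetD parent2 pa 0
  let sb := PySem.List.pyGetD parent2 pb 0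
  if pa ≠ pb then
    if sa ≤ sb then
      PySem.List.pySetD (PySem.List.pySetD parent2 pa (sa + sb)) pb pa
    else
      PySem.List.pySetD (PySem.List.pySetD parent2 pb (sa + sb)) pa pb
  else parent2

def pvStepA (sp : List (List Int)) (st : List Int × PySem.Dict Int Int) (i : Int) :
    List Int × PySem.Dict Int Int :=
  let pi := PySem.List.pyGetD sp i []
  let x := PySem.List.pyGetD pi 0 0
  let y := PySem.List.pyGetD pi 1 0
  let parent1 := if PySem.List.pyGetD (PySem.List.pyGetD sp (i-1) []) 0 0 = x
      then pvUnion st.1 (i-1) i else st.1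
  match PySem.Dict.get? st.2 y with
  | some j => (pvUnion parent1 j i, st.2)
  | none => (parent1, st.2.insert y i)

def maxActivated (points : List (List Int)) : Int :=
  let n : Nat := points.length
  let parent0 : List Int := List.replicate n (-1)
  let sp := PySem.List.sorted points (fun p => PySem.List.pyGetD p 0 0) false
  let idy0 : PySem.Dict Int Int :=
    PySem.Dict.insert PySem.Dict.empty (PySem.List.pyGetD (PySem.List.pyGetD sp 0 []) 1 0) 0
  let st := (PySem.List.pyRange 1 n 1).foldl (pvStepA sp) (parent0, idy0)
  let ab := (PySem.List.pyRange 0 n 1).foldl (fun (ab : Int × Int) i =>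
      let l := PySem.List.sorted [ab.1, ab.2, PySem.List.pyGetD st.1 i 0] (fun v => v) false
      (PySem.List.pyGetD l 0 0, PySem.List.pyGetD l 1 0)) (0, 0)
  |ab.1 + ab.2| + 1

-- ===== PORT B =====
def pvMerge (comp : List Int) (dst src : Int) : List Int :=
  comp.map (fun c => if c = src then dst else c)

def pvStepB (sp : List (List Int)) (st : List Int × PySem.Dict Int Int) (i : Int) :
    List Int × PySem.Dict Int Int :=
  let pi := PySem.List.pyGetD sp i []
  let x := PySem.List.pyGetD pi 0 0
  let y := PySem.List.pyGetD pi 1 0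
  let comp1 := if PySem.List.pyGetD (PySem.List.pyGetD sp (i-1) []) 0 0 = x ∧
      PySem.List.pyGetD st.1 (i-1) 0 ≠ PySem.List.pyGetD st.1 i 0
    then pvMerge st.1 (PySem.List.pyGetD st.1 (i-1) 0) (PySem.List.pyGetD st.1 i 0) else st.1
  match PySem.Dict.get? st.2 y with
  | none => (comp1, st.2.insert y i)
  | some j =>
      (if PySem.List.pyGetD comp1 j 0 ≠ PySem.List.pyGetD comp1 i 0
        then pvMerge comp1 (PySem.List.pyGetD comp1 j 0) (PySem.List.pyGetD comp1 i 0) else comp1,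
       st.2)

def maxActivated_alt (points : List (List Int)) : Int :=
  let sp := PySem.List.sorted points (fun p => PySem.List.pyGetD p 0 0) false
  let n : Nat := sp.length
  let comp0 : List Int := PySem.List.pyRange 0 n 1
  let fy0 : PySem.Dict Int Int :=
    PySem.Dict.insert PySem.Dict.empty (PySem.List.pyGetD (PySem.List.pyGetD sp 0 []) 1 0) 0
  let st := (PySem.List.pyRange 1 n 1).foldl (pvStepB sp) (comp0, fy0)
  let sizes := st.1.foldl (fun (d : PySem.Dict Int Int) c => d.insert c (d.getD c 0 + 1)) PySem.Dict.empty
  let s := (PySem.Dict.values sizes).foldl (fun (s : Int × Int) v =>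
      if s.1 < v then (v, s.1) else if s.2 < v then (s.1, v) else s) (0, 0)
  s.1 + s.2 + 1

-- ===== PRECONDITION & SPEC =====
-- Pre_ is exactly where the Python A returns: points is nonempty, the first point in the stable
-- sort by x has at least two coordinates (A reads points[0][1]) and every later one exactly two
-- (A unpacks [x, y] = points[i]); otherwise A raises IndexError/ValueError (and so does B).
def Pre_maxActivated (points : List (List Int)) : Prop :=
  points ≠ [] ∧
  2 ≤ ((PySem.List.sorted points (fun p => PySem.List.pyGetD p 0 0) false).headD []).length ∧
  ∀ p ∈ (PySem.List.sorted points (fun p => PySem.List.pyGetD p 0 0) false).tail, p.length = 2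
instance (points : List (List Int)) : Decidable (Pre_maxActivated points) := by
  unfold Pre_maxActivated; infer_instance

def pvWitness_maxActivated : List (List Int) := [[1, 2], [1, 5], [3, 5], [7, 0]]

def Spec_maxActivated (points : List (List Int)) (out : Int) : Prop := out = maxActivated_alt points
instance (points : List (List Int)) (out : Int) : Decidable (Spec_maxActivated points out) := by
  unfold Spec_maxActivated; infer_instance

-- ===== CLAIM (what is proved, stated in full; the proofs are below) =====
def Claim_equal_maxActivated : Prop := ∀ (points : List (List Int)), Dom_maxActivated points →
  Pre_maxActivated points → Spec_maxActivated points (maxActivated points)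

-- ===== LEMMAS AND PROOFS =====
-- ---- basic state abstractions (proof-only) ----
def pvEntry (parent : List Int) (a : Int) : Int := PySem.List.pyGetD parent a 0
def pvLab (comp : List Int) (a : Int) : Int := PySem.List.pyGetD comp a 0

theorem pvGetD_nonneg_eq (xs : List Int) (x : Int) (hx : 0 ≤ x) (d : Int) :
    PySem.List.pyGetD xs x d = xs.getD x.toNat d := by
  obtain ⟨k, rfl⟩ : ∃ k : Nat, x = (k : Int) := ⟨x.toNat, (Int.toNat_of_nonneg hx).symm⟩
  simp [PySem.List.pyGetD_natCast]

theorem pvEntry_pySetD (parent : List Int) (a v x : Int)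
    (h0 : 0 ≤ a) (h1 : a < (parent.length : Int)) (hx : 0 ≤ x) :
    pvEntry (PySem.List.pySetD parent a v) x = if x = a then v else pvEntry parent x := by
  unfold pvEntry
  rw [PySem.List.pySetD_of_nonneg parent v h0]
  rw [pvGetD_nonneg_eq _ _ hx, pvGetD_nonneg_eq _ _ hx]
  rw [List.getD_eq_getElem?_getD, List.getD_eq_getElem?_getD, List.getElem?_set]
  have : (a.toNat = x.toNat) ↔ (x = a) := by omega
  split_ifs with h h2 h2 <;> simp_all <;> omega

theorem pvLab_pvMerge (comp : List Int) (d s x : Int)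
    (hx : 0 ≤ x) (hxl : x < (comp.length : Int)) :
    pvLab (pvMerge comp d s) x = if pvLab comp x = s then d else pvLab comp x := by
  unfold pvLab pvMerge
  rw [pvGetD_nonneg_eq _ _ hx, pvGetD_nonneg_eq _ _ hx]
  rw [List.getD_eq_getElem?_getD, List.getD_eq_getElem?_getD, List.getElem?_map]
  have hlt : x.toNat < comp.length := by omega
  simp [List.getElem?_eq_getElem hlt]

theorem pvMerge_length (comp : List Int) (d s : Int) : (pvMerge comp d s).length = comp.length := by
  simp [pvMerge]

theorem pvMerge_count_dst (comp : List Int) (d s : Int) (hds : d ≠ s) :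
    (pvMerge comp d s).count d = comp.count d + comp.count s := by
  induction comp with
  | nil => simp [pvMerge]
  | cons c t ih =>
      simp only [pvMerge, List.map_cons] at *
      by_cases h : c = s
      · subst h; simp [List.count_cons, ih, hds.symm, hds]; omega
      · by_cases h2 : c = d
        · subst h2; simp [ih, h, Ne.symm hds]; omega
        · rw [List.count_cons, List.count_cons, List.count_cons, ih]
          simp [h, h2]

theorem pvMerge_count_other (comp : List Int) (d s l : Int) (hl : l ≠ d) (hl2 : l ≠ s) :
    (pvMerge comp d s).count l = comp.count l := by
  induction comp with
  | nil => simp [pvMerge]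
  | cons c t ih =>
      simp only [pvMerge, List.map_cons] at *
      by_cases h : c = s
      · subst h; simp [List.count_cons, ih, Ne.symm hl, Ne.symm hl2]
      · simp only [if_neg h, List.count_cons, ih]

-- ---- chase basics ----
theorem pvChase_root (parent : List Int) (p : Int) (h : pvEntry parent p < 0) :
    ∀ f, pvChase parent f p = p := by
  intro f; cases f <;> simp [pvChase, pvEntry] at * <;> omega

theorem pvChase_succ (parent : List Int) (f : Nat) (p : Int) :
    pvChase parent (f+1) p =
      if 0 ≤ PySem.List.pyGetD parent p 0 then pvChase parent f (PySem.List.pyGetD parent p 0) else p := rfl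

theorem pvChase_add (parent : List Int) (f g : Nat) (p : Int) :
    pvChase parent (f+g) p = pvChase parent g (pvChase parent f p) := by
  induction f generalizing p with
  | zero => simp [pvChase]
  | succ f ih =>
      have : f + 1 + g = (f + g) + 1 := by omega
      rw [this, pvChase_succ, pvChase_succ]
      split_ifs with h
      · exact ih _
      · exact (pvChase_root parent p (by unfold pvEntry; omega) g).symm

theorem pvChase_stable (parent : List Int) (f g : Nat) (p : Int)
    (h : pvEntry parent (pvChase parent f p) < 0) (hfg : f ≤ g) :
    pvChase parent g p = pvChase parent f p := by
  have : g = f + (g - f) := by omega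
  rw [this, pvChase_add]
  exact pvChase_root _ _ h _

theorem pvChase_mem (parent : List Int) (n : Nat)
    (hb : ∀ x : Int, 0 ≤ x → x < (n : Int) → pvEntry parent x < (n : Int)) :
    ∀ (f : Nat) (a : Int), 0 ≤ a → a < (n : Int) →
      0 ≤ pvChase parent f a ∧ pvChase parent f a < (n : Int) := by
  intro f
  induction f with
  | zero => intro a h0 h1; simpa [pvChase] using ⟨h0, h1⟩
  | succ f ih =>
      intro a h0 h1
      rw [pvChase_succ]
      split_ifs with h
      · exact ih _ h (by have := hb a h0 h1; unfold pvEntry at this; omega)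
      · exact ⟨h0, h1⟩


-- ---- the coupling invariant between A's forest and B's labels ----
structure pvInv (n : Nat) (parent comp : List Int) : Prop where
  lenp : parent.length = n
  lenc : comp.length = n
  bound : ∀ a : Int, 0 ≤ a → a < (n:Int) → pvEntry parent a < (n:Int)
  step : ∀ a : Int, 0 ≤ a → a < (n:Int) → 0 ≤ pvEntry parent a →
    pvLab comp (pvEntry parent a) = pvLab comp a
  reach : ∀ a : Int, 0 ≤ a → a < (n:Int) → ∃ f : Nat,
    pvEntry parent (pvChase parent f a) < 0 ∧ f < comp.count (pvLab comp a)
  inj : ∀ a b : Int, 0 ≤ a → a < (n:Int) → 0 ≤ b → b < (n:Int) →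
    pvEntry parent a < 0 → pvEntry parent b < 0 → pvLab comp a = pvLab comp b → a = b
  size : ∀ r : Int, 0 ≤ r → r < (n:Int) → pvEntry parent r < 0 →
    pvEntry parent r = -(comp.count (pvLab comp r) : Int)

def pvF (parent : List Int) (a : Int) : Int := pvChase parent parent.length a

theorem pvLab_chase {n : Nat} {parent comp : List Int} (hI : pvInv n parent comp) :
    ∀ (f : Nat) (a : Int), 0 ≤ a → a < (n:Int) →
      pvLab comp (pvChase parent f a) = pvLab comp a := by
  intro f
  induction f with
  | zero => intro a _ _; rfl
  | succ f ih =>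
      intro a h0 h1
      rw [pvChase_succ]
      split_ifs with h
      · have hb := hI.bound a h0 h1
        rw [ih _ h (by unfold pvEntry at hb; omega)]
        exact hI.step a h0 h1 h
      · rfl

theorem pvF_root {n : Nat} {parent comp : List Int} (hI : pvInv n parent comp)
    (a : Int) (h0 : 0 ≤ a) (h1 : a < (n:Int)) :
    pvEntry parent (pvF parent a) < 0 ∧ 0 ≤ pvF parent a ∧ pvF parent a < (n:Int) ∧
      pvLab comp (pvF parent a) = pvLab comp a := by
  obtain ⟨f, hf, hcnt⟩ := hI.reach a h0 h1
  have hcl := List.count_le_length (l := comp) (a := pvLab comp a)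
  have hc := hI.lenc; have hp := hI.lenp
  have hF : pvF parent a = pvChase parent f a :=
    pvChase_stable parent f parent.length a hf (by omega)
  rw [hF]
  exact ⟨hf, (pvChase_mem parent n hI.bound f a h0 h1).1,
    (pvChase_mem parent n hI.bound f a h0 h1).2, pvLab_chase hI f a h0 h1⟩

theorem pvF_is_chase_root {n : Nat} {parent comp : List Int} (hI : pvInv n parent comp)
    (a : Int) (h0 : 0 ≤ a) (h1 : a < (n:Int)) (f : Nat)
    (hf : pvEntry parent (pvChase parent f a) < 0) :
    pvChase parent f a = pvF parent a := by
  by_cases hle : f ≤ parent.length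
  · exact (pvChase_stable parent f parent.length a hf hle).symm
  · have hroot := (pvF_root hI a h0 h1).1
    unfold pvF at *
    exact pvChase_stable parent parent.length f a hroot (by omega)

-- ---- path compression (the mutation inside find) preserves everything ----
theorem pvFind_spec {n : Nat} {parent comp : List Int} (hI : pvInv n parent comp)
    (a : Int) (h0 : 0 ≤ a) (h1 : a < (n:Int)) :
    (pvFind parent a).2 = pvF parent a ∧
    (pvFind parent a).1.length = parent.length ∧
    pvInv n (pvFind parent a).1 comp ∧
    (∀ x : Int, 0 ≤ x → x < (n:Int) → pvF (pvFind parent a).1 x = pvF parent x) ∧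
    (∀ x : Int, 0 ≤ x → x < (n:Int) → pvEntry parent x < 0 →
       pvEntry (pvFind parent a).1 x = pvEntry parent x) ∧
    (∀ x : Int, 0 ≤ x → x < (n:Int) →
       (pvEntry (pvFind parent a).1 x < 0 ↔ pvEntry parent x < 0)) := by
  have hfind : pvFind parent a =
      (if a ≠ pvF parent a then PySem.List.pySetD parent a (pvF parent a) else parent,
        pvF parent a) := rfl
  by_cases hap : a = pvF parent a
  · rw [hfind, if_neg (fun h => h hap)]
    exact ⟨rfl, rfl, hI, fun x _ _ => rfl, fun x _ _ _ => rfl, fun x _ _ => Iff.rfl⟩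
  · obtain ⟨hrootp, hp0, hp1, hlabp⟩ := pvF_root hI a h0 h1
    set p := pvF parent a with hpdef
    have hea : 0 ≤ pvEntry parent a := by
      by_contra hea
      apply hap
      rw [hpdef]
      unfold pvF
      exact (pvChase_root parent a (by omega) parent.length).symm
    have hlen : a < (parent.length : Int) := by rw [hI.lenp]; exact h1
    set parent' := PySem.List.pySetD parent a p with hp'
    have hentry' : ∀ x : Int, 0 ≤ x →
        pvEntry parent' x = if x = a then p else pvEntry parent x :=
      fun x hx => pvEntry_pySetD parent a p x h0 hlen hx
    have hpa : ¬ (p = a) := fun h => hap (by rw [← h])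
    have hlen' : parent'.length = parent.length := by
      rw [hp', PySem.List.pySetD_of_nonneg parent p h0]; simp
    have hep' : pvEntry parent' p < 0 := by
      rw [hentry' p hp0, if_neg hpa]; exact hrootp
    have hchase : ∀ (f : Nat) (x : Int), 0 ≤ x → x < (n:Int) →
        pvEntry parent (pvChase parent f x) < 0 →
        pvChase parent' f x = pvChase parent f x := by
      intro f
      induction f with
      | zero => intro x _ _ _; rfl
      | succ f ih =>
          intro x hx0 hx1 hroot
          by_cases hxa : x = a
          · rw [hxa] at hroot ⊢
            have hold : pvChase parent (f+1) a = p :=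
              pvF_is_chase_root hI a h0 h1 (f+1) hroot
            have he : PySem.List.pyGetD parent' a 0 = p := by
              have h := hentry' a h0; rw [if_pos rfl] at h; exact h
            have lhs : pvChase parent' (f+1) a = p := by
              rw [pvChase_succ, he, if_pos hp0]
              exact pvChase_root parent' p hep' f
            rw [lhs, hold]
          · have he : PySem.List.pyGetD parent' x 0 = PySem.List.pyGetD parent x 0 := by
              have h := hentry' x hx0; rw [if_neg hxa] at h; exact h
            have lhs : pvChase parent' (f+1) x =
                if 0 ≤ PySem.List.pyGetD parent x 0 then
                  pvChase parent' f (PySem.List.pyGetD parent x 0) else x := by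
              rw [pvChase_succ, he]
            rw [lhs, pvChase_succ]
            split_ifs with h
            · rw [pvChase_succ, if_pos h] at hroot
              have hb := hI.bound x hx0 hx1
              unfold pvEntry at hb
              exact ih _ h (by omega) hroot
            · rfl
    have hFeq : ∀ x : Int, 0 ≤ x → x < (n:Int) → pvF parent' x = pvF parent x := by
      intro x hx0 hx1
      have hroot := (pvF_root hI x hx0 hx1).1
      unfold pvF
      rw [hlen']
      exact hchase parent.length x hx0 hx1 hroot
    have hInv' : pvInv n parent' comp := by
      refine ⟨by rw [hlen', hI.lenp], hI.lenc, ?_, ?_, ?_, ?_, ?_⟩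
      · intro x hx0 hx1; rw [hentry' x hx0]
        split_ifs with h
        · exact hp1
        · exact hI.bound x hx0 hx1
      · intro x hx0 hx1 hnn
        have he := hentry' x hx0
        by_cases h : x = a
        · rw [he, if_pos h]; rw [h]; exact hlabp
        · rw [he, if_neg h] at hnn ⊢
          exact hI.step x hx0 hx1 hnn
      · intro x hx0 hx1
        obtain ⟨f, hf, hcnt⟩ := hI.reach x hx0 hx1
        refine ⟨f, ?_, hcnt⟩
        rw [hchase f x hx0 hx1 hf]
        have hne : pvChase parent f x ≠ a := by
          intro h; rw [h] at hf; omega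
        rw [hentry' _ (pvChase_mem parent n hI.bound f x hx0 hx1).1, if_neg hne]
        exact hf
      · intro x y hx0 hx1 hy0 hy1 hrx hry
        rw [hentry' x hx0] at hrx; rw [hentry' y hy0] at hry
        have hxa : x ≠ a := by intro h; rw [if_pos h] at hrx; omega
        have hya : y ≠ a := by intro h; rw [if_pos h] at hry; omega
        rw [if_neg hxa] at hrx; rw [if_neg hya] at hry
        exact hI.inj x y hx0 hx1 hy0 hy1 hrx hry
      · intro r hr0 hr1 hroot
        have he := hentry' r hr0
        have hra : r ≠ a := by intro h; rw [he, if_pos h] at hroot; omega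
        rw [he, if_neg hra] at hroot ⊢
        exact hI.size r hr0 hr1 hroot
    rw [hfind, if_pos hap]
    refine ⟨rfl, hlen', hInv', hFeq, ?_, ?_⟩
    · intro x hx0 hx1 hroot
      rw [hentry' x hx0, if_neg (by intro h; rw [h] at hroot; omega)]
    · intro x hx0 hx1
      rw [hentry' x hx0]
      split_ifs with h
      · rw [h] at *; constructor <;> (intro; omega)
      · exact Iff.rfl
-- ---- helper: labels of in-range indices occur in comp ----
theorem pvLab_mem (comp : List Int) (x : Int) (hx : 0 ≤ x) (hxl : x < (comp.length : Int)) :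
    pvLab comp x ∈ comp := by
  unfold pvLab
  rw [pvGetD_nonneg_eq _ _ hx, List.getD_eq_getElem?_getD,
    List.getElem?_eq_getElem (by omega : x.toNat < comp.length)]
  exact List.getElem_mem _

-- ---- linking two roots (the write in union) preserves the invariant ----
theorem pvLink {n : Nat} {parent comp : List Int} (hI : pvInv n parent comp)
    (r s d sc : Int)
    (hr0 : 0 ≤ r) (hr1 : r < (n:Int)) (hs0 : 0 ≤ s) (hs1 : s < (n:Int))
    (hrroot : pvEntry parent r < 0) (hsroot : pvEntry parent s < 0) (hrs : r ≠ s)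
    (hflag : (d = pvLab comp r ∧ sc = pvLab comp s) ∨ (d = pvLab comp s ∧ sc = pvLab comp r)) :
    pvInv n
      (PySem.List.pySetD (PySem.List.pySetD parent r (pvEntry parent r + pvEntry parent s)) s r)
      (pvMerge comp d sc) := by
  set e := pvEntry parent r + pvEntry parent s with hedef
  set parent1 := PySem.List.pySetD parent r e with hp1
  set parentN := PySem.List.pySetD parent1 s r with hpN
  set c' := pvMerge comp d sc with hc'
  have hlen1 : parent1.length = parent.length := by
    rw [hp1, PySem.List.pySetD_of_nonneg parent e hr0]; simp
  have hlenN : parentN.length = parent.length := by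
    rw [hpN, PySem.List.pySetD_of_nonneg parent1 r hs0]; simp [hlen1]
  have hrlen : r < (parent.length : Int) := by rw [hI.lenp]; exact hr1
  have hslen : s < (parent1.length : Int) := by rw [hlen1, hI.lenp]; exact hs1
  have hentryN : ∀ x : Int, 0 ≤ x →
      pvEntry parentN x = if x = s then r else if x = r then e else pvEntry parent x := by
    intro x hx
    rw [hpN, pvEntry_pySetD parent1 s r x hs0 hslen hx]
    rw [hp1, pvEntry_pySetD parent r e x hr0 hrlen hx]
  have hlabne : pvLab comp r ≠ pvLab comp s := by
    intro h
    exact hrs (hI.inj r s hr0 hr1 hs0 hs1 hrroot hsroot h)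
  have hds : d ≠ sc := by
    rcases hflag with ⟨h1, h2⟩ | ⟨h1, h2⟩ <;> rw [h1, h2]
    · exact hlabne
    · exact hlabne.symm
  have hclen : (c'.length : Int) = (n:Int) := by
    rw [hc', pvMerge_length, hI.lenc]
  have hlab' : ∀ x : Int, 0 ≤ x → x < (n:Int) →
      pvLab c' x = if pvLab comp x = sc then d else pvLab comp x := by
    intro x hx0 hx1
    rw [hc']
    exact pvLab_pvMerge comp d sc x hx0 (by rw [hI.lenc]; exact hx1)
  have he_neg : e < 0 := by rw [hedef]; omega
  have hcr := hI.size r hr0 hr1 hrroot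
  have hcs := hI.size s hs0 hs1 hsroot
  have hcrpos : 0 < comp.count (pvLab comp r) :=
    List.count_pos_iff.mpr (pvLab_mem comp r hr0 (by rw [hI.lenc]; exact hr1))
  have hcspos : 0 < comp.count (pvLab comp s) :=
    List.count_pos_iff.mpr (pvLab_mem comp s hs0 (by rw [hI.lenc]; exact hs1))
  -- total count of the merged label
  have hcountd : c'.count d = comp.count (pvLab comp r) + comp.count (pvLab comp s) := by
    rcases hflag with ⟨h1, h2⟩ | ⟨h1, h2⟩
    · rw [hc', h1, h2, pvMerge_count_dst comp _ _ (by rw [← h1, ← h2]; exact hds)]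
    · rw [hc', h1, h2, pvMerge_count_dst comp _ _ (by rw [← h1, ← h2]; exact hds)]
      omega
  have hcount_other : ∀ l : Int, l ≠ pvLab comp r → l ≠ pvLab comp s →
      c'.count l = comp.count l := by
    intro l h1 h2
    rw [hc']
    rcases hflag with ⟨hf1, hf2⟩ | ⟨hf1, hf2⟩
    · exact pvMerge_count_other comp d sc l (by rw [hf1]; exact h1) (by rw [hf2]; exact h2)
    · exact pvMerge_count_other comp d sc l (by rw [hf1]; exact h2) (by rw [hf2]; exact h1)
  -- chases in the new forest
  have hchase : ∀ (f : Nat) (x : Int), 0 ≤ x → x < (n:Int) →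
      pvEntry parent (pvChase parent f x) < 0 →
      (pvChase parent f x = s → pvChase parentN (f+1) x = r) ∧
      (pvChase parent f x ≠ s → pvChase parentN f x = pvChase parent f x) := by
    intro f
    induction f with
    | zero =>
        intro x hx0 hx1 _
        constructor
        · intro hxs
          have hxs' : x = s := hxs
          rw [pvChase_succ]
          have h1 : PySem.List.pyGetD parentN x 0 = r := by
            have h := hentryN x hx0; rw [if_pos hxs'] at h; exact h
          rw [h1, if_pos hr0]
          have hrN : pvEntry parentN r < 0 := by
            rw [hentryN r hr0, if_neg hrs, if_pos rfl]; exact he_neg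
          exact pvChase_root parentN r hrN _
        · intro _; rfl
    | succ f ih =>
        intro x hx0 hx1 hroot
        by_cases hes : 0 ≤ pvEntry parent x
        · -- x is not a root, so x ∉ {r, s}; new entry at x is the old one
          have hxs : x ≠ s := by intro h; rw [h] at hes; omega
          have hxr : x ≠ r := by intro h; rw [h] at hes; omega
          have heq : PySem.List.pyGetD parentN x 0 = PySem.List.pyGetD parent x 0 := by
            have h := hentryN x hx0; rw [if_neg hxs, if_neg hxr] at h; exact h
          have hb := hI.bound x hx0 hx1
          have hxe0 : 0 ≤ PySem.List.pyGetD parent x 0 := hes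
          have hnext0 : (0:Int) ≤ pvEntry parent x := hes
          have hnr : pvChase parent (f+1) x = pvChase parent f (pvEntry parent x) := by
            rw [pvChase_succ, if_pos hxe0]; rfl
          have hnext_lt : pvEntry parent x < (n:Int) := hb
          have ihx := ih (pvEntry parent x) hnext0 (by omega) (by rw [← hnr]; exact hroot)
          constructor
          · intro hxs2
            rw [hnr] at hxs2
            have h2 := ihx.1 hxs2
            have : pvChase parentN (f+1+1) x = pvChase parentN (f+1) (pvEntry parent x) := by
              rw [pvChase_succ, heq, if_pos hxe0]; rfl
            rw [this, h2]
          · intro hxs2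
            rw [hnr] at hxs2
            have h2 := ihx.2 hxs2
            have : pvChase parentN (f+1) x = pvChase parentN f (pvEntry parent x) := by
              rw [pvChase_succ, heq, if_pos hxe0]; rfl
            rw [this, h2, hnr]
        · -- x is already a root: the old chase stays at x
          have hstop : pvChase parent (f+1) x = x := pvChase_root parent x (by omega) (f+1)
          constructor
          · intro hxs
            rw [hstop] at hxs
            rw [pvChase_succ]
            have h1 : PySem.List.pyGetD parentN x 0 = r := by
              have h := hentryN x hx0; rw [if_pos hxs] at h; exact h
            rw [h1, if_pos hr0]
            have hrN : pvEntry parentN r < 0 := by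
              rw [hentryN r hr0, if_neg hrs, if_pos rfl]; exact he_neg
            exact pvChase_root parentN r hrN _
          · intro hxs
            rw [hstop] at hxs
            rw [hstop]
            by_cases hxr : x = r
            · have hrN : pvEntry parentN x < 0 := by
                rw [hentryN x hx0, if_neg hxs, if_pos hxr]; exact he_neg
              exact pvChase_root parentN x hrN (f+1)
            · have hrN : pvEntry parentN x < 0 := by
                rw [hentryN x hx0, if_neg hxs, if_neg hxr]; omega
              exact pvChase_root parentN x hrN (f+1)
  refine ⟨by rw [hlenN, hI.lenp], by rw [hc', pvMerge_length, hI.lenc], ?_, ?_, ?_, ?_, ?_⟩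
  · -- bound
    intro x hx0 hx1
    rw [hentryN x hx0]
    split_ifs with h1 h2
    · exact hr1
    · omega
    · exact hI.bound x hx0 hx1
  · -- step
    intro x hx0 hx1 hnn
    rw [hentryN x hx0] at hnn ⊢
    split_ifs at hnn ⊢ with h1 h2
    · -- x = s, new parent r : show lab' r = lab' s
      rw [h1]
      rw [hlab' r hr0 hr1, hlab' s hs0 hs1]
      rcases hflag with ⟨hf1, hf2⟩ | ⟨hf1, hf2⟩
      · rw [if_neg (show ¬ pvLab comp r = sc by rw [hf2]; exact hlabne),
            if_pos hf2.symm, ← hf1]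
      · rw [if_pos hf2.symm,
            if_neg (show ¬ pvLab comp s = sc by rw [hf2]; exact Ne.symm hlabne), ← hf1]
    · omega
    · have hb := hI.bound x hx0 hx1
      have hstep := hI.step x hx0 hx1 hnn
      rw [hlab' _ hnn (by omega), hlab' x hx0 hx1, hstep]
  · -- reach
    intro x hx0 hx1
    obtain ⟨f, hf, hcnt⟩ := hI.reach x hx0 hx1
    have hρ0 := (pvChase_mem parent n hI.bound f x hx0 hx1).1
    have hρ1 := (pvChase_mem parent n hI.bound f x hx0 hx1).2
    have hlabx := pvLab_chase hI f x hx0 hx1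
    by_cases hρs : pvChase parent f x = s
    · -- new root is r, one extra step
      have hnew := (hchase f x hx0 hx1 hf).1 hρs
      refine ⟨f+1, ?_, ?_⟩
      · rw [hnew, hentryN r hr0, if_neg hrs, if_pos rfl]
        exact he_neg
      · -- label of x is lab s; merged count grows by count of lab r
        have hlx : pvLab comp x = pvLab comp s := by rw [← hlabx, hρs]
        have hlcx : pvLab c' x = d := by
          rw [hlab' x hx0 hx1, hlx]
          rcases hflag with ⟨hf1, hf2⟩ | ⟨hf1, hf2⟩
          · rw [if_pos hf2.symm]
          · rw [if_neg (show ¬ pvLab comp s = sc by rw [hf2]; exact Ne.symm hlabne)]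
            exact hf1.symm
        rw [hlcx, hcountd]
        rw [hlx] at hcnt
        omega
    · have hnew := (hchase f x hx0 hx1 hf).2 hρs
      by_cases hρr : pvChase parent f x = r
      · refine ⟨f, ?_, ?_⟩
        · rw [hnew, hρr, hentryN r hr0, if_neg hrs, if_pos rfl]
          exact he_neg
        · have hlx : pvLab comp x = pvLab comp r := by rw [← hlabx, hρr]
          have hlcx : pvLab c' x = d := by
            rw [hlab' x hx0 hx1, hlx]
            rcases hflag with ⟨hf1, hf2⟩ | ⟨hf1, hf2⟩
            · rw [if_neg (show ¬ pvLab comp r = sc by rw [hf2]; exact hlabne)]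
              exact hf1.symm
            · rw [if_pos hf2.symm]
          rw [hlcx, hcountd]
          rw [hlx] at hcnt
          omega
      · refine ⟨f, ?_, ?_⟩
        · rw [hnew, hentryN _ hρ0, if_neg hρs, if_neg hρr]
          exact hf
        · have hlρr : pvLab comp x ≠ pvLab comp r := by
            intro h
            exact hρr (hI.inj _ r hρ0 hρ1 hr0 hr1 hf hrroot (by rw [hlabx, h]))
          have hlρs : pvLab comp x ≠ pvLab comp s := by
            intro h
            exact hρs (hI.inj _ s hρ0 hρ1 hs0 hs1 hf hsroot (by rw [hlabx, h]))
          have hl' : pvLab c' x = pvLab comp x := by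
            rw [hlab' x hx0 hx1, if_neg (by
              rcases hflag with ⟨hf1, hf2⟩ | ⟨hf1, hf2⟩ <;> rw [hf2]
              · exact hlρs
              · exact hlρr)]
          rw [hl', hcount_other _ hlρr hlρs]
          exact hcnt
  · -- inj
    intro x y hx0 hx1 hy0 hy1 hrx hry hlxy
    rw [hentryN x hx0] at hrx
    rw [hentryN y hy0] at hry
    have hxs : x ≠ s := by intro h; rw [if_pos h] at hrx; omega
    have hys : y ≠ s := by intro h; rw [if_pos h] at hry; omega
    rw [if_neg hxs] at hrx; rw [if_neg hys] at hry
    -- characterize labels of remaining roots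
    have hkey : ∀ z : Int, 0 ≤ z → z < (n:Int) → z ≠ s →
        (z = r ∨ pvEntry parent z < 0) → pvLab c' z = if z = r then d else pvLab comp z := by
      intro z hz0 hz1 hzs hz
      rw [hlab' z hz0 hz1]
      by_cases hzr : z = r
      · rw [if_pos hzr, hzr]
        rcases hflag with ⟨hf1, hf2⟩ | ⟨hf1, hf2⟩
        · rw [if_neg (show ¬ pvLab comp r = sc by rw [hf2]; exact hlabne)]
          exact hf1.symm
        · rw [if_pos hf2.symm]
      · rw [if_neg hzr]
        have hzroot : pvEntry parent z < 0 := by rcases hz with h | h; exact absurd h hzr; exact h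
        have h1 : pvLab comp z ≠ pvLab comp r := by
          intro h; exact hzr (hI.inj z r hz0 hz1 hr0 hr1 hzroot hrroot h)
        have h2 : pvLab comp z ≠ pvLab comp s := by
          intro h; exact hzs (hI.inj z s hz0 hz1 hs0 hs1 hzroot hsroot h)
        rw [if_neg (by
          rcases hflag with ⟨hf1, hf2⟩ | ⟨hf1, hf2⟩ <;> rw [hf2]
          · exact h2
          · exact h1)]
    have hrootx : x = r ∨ pvEntry parent x < 0 := by
      by_cases h : x = r
      · exact Or.inl h
      · rw [if_neg h] at hrx; exact Or.inr hrx
    have hrooty : y = r ∨ pvEntry parent y < 0 := by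
      by_cases h : y = r
      · exact Or.inl h
      · rw [if_neg h] at hry; exact Or.inr hry
    rw [hkey x hx0 hx1 hxs hrootx, hkey y hy0 hy1 hys hrooty] at hlxy
    by_cases hxr : x = r <;> by_cases hyr : y = r
    · rw [hxr, hyr]
    · exfalso
      rw [if_pos hxr, if_neg hyr] at hlxy
      have hyroot : pvEntry parent y < 0 := by
        rcases hrooty with h | h; exact absurd h hyr; exact h
      rcases hflag with ⟨hf1, hf2⟩ | ⟨hf1, hf2⟩
      · exact hyr (hI.inj y r hy0 hy1 hr0 hr1 hyroot hrroot (by rw [← hlxy, hf1]))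
      · exact hys (hI.inj y s hy0 hy1 hs0 hs1 hyroot hsroot (by rw [← hlxy, hf1]))
    · exfalso
      rw [if_neg hxr, if_pos hyr] at hlxy
      have hxroot : pvEntry parent x < 0 := by
        rcases hrootx with h | h; exact absurd h hxr; exact h
      rcases hflag with ⟨hf1, hf2⟩ | ⟨hf1, hf2⟩
      · exact hxr (hI.inj x r hx0 hx1 hr0 hr1 hxroot hrroot (by rw [hlxy, hf1]))
      · exact hxs (hI.inj x s hx0 hx1 hs0 hs1 hxroot hsroot (by rw [hlxy, hf1]))
    · rw [if_neg hxr, if_neg hyr] at hlxy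
      have hxroot : pvEntry parent x < 0 := by
        rcases hrootx with h | h; exact absurd h hxr; exact h
      have hyroot : pvEntry parent y < 0 := by
        rcases hrooty with h | h; exact absurd h hyr; exact h
      exact hI.inj x y hx0 hx1 hy0 hy1 hxroot hyroot hlxy
  · -- size
    intro z hz0 hz1 hroot
    rw [hentryN z hz0] at hroot ⊢
    have hzs : z ≠ s := by intro h; rw [if_pos h] at hroot; omega
    rw [if_neg hzs] at hroot ⊢
    by_cases hzr : z = r
    · rw [if_pos hzr]
      have hld : pvLab c' z = d := by
        rw [hlab' z hz0 hz1, hzr]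
        rcases hflag with ⟨hf1, hf2⟩ | ⟨hf1, hf2⟩
        · rw [if_neg (show ¬ pvLab comp r = sc by rw [hf2]; exact hlabne)]
          exact hf1.symm
        · rw [if_pos hf2.symm]
      rw [hld, hcountd, hedef]
      omega
    · rw [if_neg hzr] at hroot ⊢
      have h1 : pvLab comp z ≠ pvLab comp r := by
        intro h; exact hzr (hI.inj z r hz0 hz1 hr0 hr1 hroot hrroot h)
      have h2 : pvLab comp z ≠ pvLab comp s := by
        intro h; exact hzs (hI.inj z s hz0 hz1 hs0 hs1 hroot hsroot h)
      have hl' : pvLab c' z = pvLab comp z := by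
        rw [hlab' z hz0 hz1, if_neg (by
          rcases hflag with ⟨hf1, hf2⟩ | ⟨hf1, hf2⟩ <;> rw [hf2]
          · exact h2
          · exact h1)]
      rw [hl', hcount_other _ h1 h2]
      exact hI.size z hz0 hz1 hroot
-- ---- one union in A matches one conditional relabelling in B ----
theorem pvUnion_spec {n : Nat} {parent comp : List Int} (hI : pvInv n parent comp)
    (u v : Int) (hu0 : 0 ≤ u) (hu1 : u < (n:Int)) (hv0 : 0 ≤ v) (hv1 : v < (n:Int)) :
    pvInv n (pvUnion parent u v)
      (if pvLab comp u ≠ pvLab comp v then pvMerge comp (pvLab comp u) (pvLab comp v) else comp) := by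
  obtain ⟨hpa_eq, hlen1, hI1, hF1, hent1, hroot1⟩ := pvFind_spec hI u hu0 hu1
  set parent1 := (pvFind parent u).1 with hp1
  obtain ⟨hpb_eq, hlen2, hI2, hF2, hent2, hroot2⟩ := pvFind_spec hI1 v hv0 hv1
  set parent2 := (pvFind parent1 v).1 with hp2
  set pa := (pvFind parent u).2 with hpa
  set pb := (pvFind parent1 v).2 with hpb
  have hun : pvUnion parent u v =
      (if pa ≠ pb then
        if pvEntry parent2 pa ≤ pvEntry parent2 pb then
          PySem.List.pySetD (PySem.List.pySetD parent2 pa (pvEntry parent2 pa + pvEntry parent2 pb)) pb pa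
        else
          PySem.List.pySetD (PySem.List.pySetD parent2 pb (pvEntry parent2 pa + pvEntry parent2 pb)) pa pb
      else parent2) := rfl
  -- pa and pb are roots of parent2, with labels of u and v
  obtain ⟨hpau_root, hpa0, hpa1, hpau_lab⟩ := pvF_root hI u hu0 hu1
  rw [← hpa_eq] at hpau_root hpa0 hpa1 hpau_lab
  obtain ⟨hpbv_root, hpb0, hpb1, hpbv_lab⟩ := pvF_root hI1 v hv0 hv1
  rw [← hpb_eq] at hpbv_root hpb0 hpb1 hpbv_lab
  have hpa_root1 : pvEntry parent1 pa < 0 := by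
    rw [hent1 _ hpa0 hpa1 hpau_root]; exact hpau_root
  have hpa_root2 : pvEntry parent2 pa < 0 := by
    rw [hent2 _ hpa0 hpa1 hpa_root1]; exact hpa_root1
  have hpb_root2 : pvEntry parent2 pb < 0 := by
    rw [hent2 _ hpb0 hpb1 hpbv_root]; exact hpbv_root
  have hpb_ent : pvEntry parent2 pb = pvEntry parent1 pb := by
    rw [hent2 _ hpb0 hpb1 hpbv_root]
  -- labels: pvLab comp pa = pvLab comp u, pvLab comp pb = pvLab comp v
  have hlab_pb : pvLab comp pb = pvLab comp v := hpbv_lab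
  have hlab_pa : pvLab comp pa = pvLab comp u := hpau_lab
  have hcond : (pa = pb) ↔ (pvLab comp u = pvLab comp v) := by
    rw [← hlab_pa, ← hlab_pb]
    constructor
    · intro h; rw [h]
    · intro h
      exact hI2.inj pa pb hpa0 hpa1 hpb0 hpb1 hpa_root2 hpb_root2 h
  rw [hun]
  by_cases hpapb : pa = pb
  · rw [if_neg (show ¬(pa ≠ pb) from fun hh => hh hpapb),
        if_neg (show ¬(pvLab comp u ≠ pvLab comp v) from fun h => h (hcond.1 hpapb))]
    exact hI2
  · rw [if_pos (show pa ≠ pb from hpapb),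
        if_pos (show pvLab comp u ≠ pvLab comp v from fun h => hpapb (hcond.2 h))]
    split_ifs with hsz
    · -- pa becomes the root
      have := pvLink hI2 pa pb (pvLab comp u) (pvLab comp v)
        hpa0 hpa1 hpb0 hpb1 hpa_root2 hpb_root2 hpapb
        (Or.inl ⟨hlab_pa.symm, hlab_pb.symm⟩)
      exact this
    · -- pb becomes the root
      have := pvLink hI2 pb pa (pvLab comp u) (pvLab comp v)
        hpb0 hpb1 hpa0 hpa1 hpb_root2 hpa_root2 (Ne.symm hpapb)
        (Or.inr ⟨hlab_pa.symm, hlab_pb.symm⟩)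
      rw [show pvEntry parent2 pb + pvEntry parent2 pa =
        pvEntry parent2 pa + pvEntry parent2 pb from add_comm _ _] at this
      exact this
-- ---- the shared y-dict only ever stores in-range indices ----
def pvGoodDict (n : Nat) (d : PySem.Dict Int Int) : Prop :=
  ∀ kv ∈ d.items, 0 ≤ kv.2 ∧ kv.2 < (n:Int)

theorem pvStep_spec {n : Nat} (sp : List (List Int)) {parent comp : List Int}
    {idy : PySem.Dict Int Int} (hI : pvInv n parent comp) (hg : pvGoodDict n idy)
    (i : Int) (hi1 : 1 ≤ i) (hi2 : i < (n:Int)) :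
    pvInv n (pvStepA sp (parent, idy) i).1 (pvStepB sp (comp, idy) i).1 ∧
    (pvStepA sp (parent, idy) i).2 = (pvStepB sp (comp, idy) i).2 ∧
    pvGoodDict n (pvStepA sp (parent, idy) i).2 := by
  set pii := PySem.List.pyGetD sp i [] with hpii
  set x := PySem.List.pyGetD pii 0 0 with hx
  set y := PySem.List.pyGetD pii 1 0 with hy0
  set px := PySem.List.pyGetD (PySem.List.pyGetD sp (i-1) []) 0 0 with hpx0
  set parent1 := (if px = x then pvUnion parent (i-1) i else parent) with hpar1
  set comp1 := (if px = x ∧ PySem.List.pyGetD comp (i-1) 0 ≠ PySem.List.pyGetD comp i 0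
      then pvMerge comp (PySem.List.pyGetD comp (i-1) 0) (PySem.List.pyGetD comp i 0)
      else comp) with hcomp1
  have hI1 : pvInv n parent1 comp1 := by
    by_cases hpx : px = x
    · rw [hpar1, if_pos hpx, hcomp1]
      have hu := pvUnion_spec hI (i-1) i (by omega) (by omega) (by omega) hi2
      unfold pvLab at hu
      by_cases hne : PySem.List.pyGetD comp (i-1) 0 ≠ PySem.List.pyGetD comp i 0
      · rw [if_pos (⟨hpx, hne⟩ : px = x ∧ _)]
        rw [if_pos hne] at hu
        exact hu
      · rw [if_neg (fun hcon => hne hcon.2)]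
        rw [if_neg hne] at hu
        exact hu
    · rw [hpar1, if_neg hpx, hcomp1, if_neg (fun hcon => hpx hcon.1)]
      exact hI
  have hstepA : pvStepA sp (parent, idy) i =
      (match PySem.Dict.get? idy y with
        | some j => (pvUnion parent1 j i, idy)
        | none => (parent1, idy.insert y i)) := rfl
  have hstepB : pvStepB sp (comp, idy) i =
      (match PySem.Dict.get? idy y with
        | none => (comp1, idy.insert y i)
        | some j =>
            (if PySem.List.pyGetD comp1 j 0 ≠ PySem.List.pyGetD comp1 i 0
              then pvMerge comp1 (PySem.List.pyGetD comp1 j 0) (PySem.List.pyGetD comp1 i 0)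
              else comp1, idy)) := rfl
  rcases hyy : PySem.Dict.get? idy y with _ | j
  · rw [hstepA, hstepB, hyy]
    refine ⟨hI1, rfl, ?_⟩
    intro kv hkv
    rw [PySem.Dict.mem_items_insert] at hkv
    rcases hkv with h | ⟨h, _⟩
    · rw [h]; exact ⟨by omega, hi2⟩
    · exact hg kv h
  · rw [hstepA, hstepB, hyy]
    have hj := hg (y, j) (PySem.Dict.mem_items_of_get?_eq_some _ hyy)
    have hu := pvUnion_spec hI1 j i hj.1 hj.2 (by omega) hi2
    unfold pvLab at hu
    exact ⟨hu, rfl, hg⟩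

theorem pvLoop {n : Nat} (sp : List (List Int)) :
    ∀ (l : List Int), (∀ i ∈ l, 1 ≤ i ∧ i < (n:Int)) →
    ∀ (parent comp : List Int) (idy : PySem.Dict Int Int),
      pvInv n parent comp → pvGoodDict n idy →
      pvInv n (l.foldl (pvStepA sp) (parent, idy)).1 (l.foldl (pvStepB sp) (comp, idy)).1 ∧
      (l.foldl (pvStepA sp) (parent, idy)).2 = (l.foldl (pvStepB sp) (comp, idy)).2 ∧
      pvGoodDict n (l.foldl (pvStepA sp) (parent, idy)).2 := by
  intro l
  induction l with
  | nil => intro _ parent comp idy hI hg; exact ⟨hI, rfl, hg⟩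
  | cons i l ih =>
      intro hmem parent comp idy hI hg
      have hi := hmem i (List.mem_cons_self)
      obtain ⟨hI', heq, hg'⟩ := pvStep_spec sp hI hg i hi.1 hi.2
      simp only [List.foldl_cons]
      have h1 : pvStepA sp (parent, idy) i =
          ((pvStepA sp (parent, idy) i).1, (pvStepA sp (parent, idy) i).2) := rfl
      have h2 : pvStepB sp (comp, idy) i =
          ((pvStepB sp (comp, idy) i).1, (pvStepB sp (comp, idy) i).2) := rfl
      rw [h1, h2, ← heq]
      exact ih (fun k hk => hmem k (List.mem_cons_of_mem _ hk))
        (pvStepA sp (parent, idy) i).1 (pvStepB sp (comp, idy) i).1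
        (pvStepA sp (parent, idy) i).2 hI' hg'
-- ---- the initial state satisfies the invariant ----
theorem pvInit (n : Nat) :
    pvInv n (List.replicate n (-1)) (PySem.List.pyRange 0 (n:Int) 1) := by
  have hent : ∀ a : Int, 0 ≤ a → a < (n:Int) →
      pvEntry (List.replicate n (-1)) a = -1 := by
    intro a h0 h1
    unfold pvEntry
    rw [pvGetD_nonneg_eq _ _ h0, List.getD_replicate (-1) (show a.toNat < n by omega)]
  have hlab : ∀ a : Int, 0 ≤ a → a < (n:Int) →
      pvLab (PySem.List.pyRange 0 (n:Int) 1) a = a := by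
    intro a h0 h1
    unfold pvLab
    rw [pvGetD_nonneg_eq _ _ h0, List.getD_eq_getElem?_getD,
      List.getElem?_eq_getElem (by rw [PySem.List.length_pyRange_one]; omega),
      PySem.List.getElem_pyRange_one]
    simp; omega
  have hmem : ∀ a : Int, 0 ≤ a → a < (n:Int) → a ∈ PySem.List.pyRange 0 (n:Int) 1 := by
    intro a h0 h1; exact PySem.List.mem_pyRange_one.mpr ⟨h0, h1⟩
  have hcnt : ∀ a : Int, 0 ≤ a → a < (n:Int) →
      (PySem.List.pyRange 0 (n:Int) 1).count a = 1 := by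
    intro a h0 h1
    exact List.count_eq_one_of_mem (PySem.List.nodup_pyRange_one 0 (n:Int)) (hmem a h0 h1)
  refine ⟨by simp, by rw [PySem.List.length_pyRange_one]; omega, ?_, ?_, ?_, ?_, ?_⟩
  · intro a h0 h1; rw [hent a h0 h1]; omega
  · intro a h0 h1 hnn; rw [hent a h0 h1] at hnn; omega
  · intro a h0 h1
    refine ⟨0, ?_, ?_⟩
    · show pvEntry _ a < 0
      rw [hent a h0 h1]; omega
    · rw [hlab a h0 h1, hcnt a h0 h1]; omega
  · intro a b h0 h1 hb0 hb1 _ _ hl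
    rw [hlab a h0 h1, hlab b hb0 hb1] at hl; exact hl
  · intro r h0 h1 _
    rw [hent r h0 h1, hlab r h0 h1, hcnt r h0 h1]; simp

-- ---- two smallest / two largest selection ----
def pvTwoMinStep (ab : Int × Int) (v : Int) : Int × Int :=
  let l := PySem.List.sorted [ab.1, ab.2, v] (fun w => w) false
  (PySem.List.pyGetD l 0 0, PySem.List.pyGetD l 1 0)

def pvTwoMaxStep (s : Int × Int) (v : Int) : Int × Int :=
  if s.1 < v then (v, s.1) else if s.2 < v then (s.1, v) else s

def pvIsTwoMin (M : List Int) (a b : Int) : Prop :=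
  ∃ rest, (a :: b :: rest).Perm M ∧ a ≤ b ∧ ∀ v ∈ rest, b ≤ v

def pvIsTwoMax (M : List Int) (a b : Int) : Prop :=
  ∃ rest, (a :: b :: rest).Perm M ∧ b ≤ a ∧ ∀ v ∈ rest, v ≤ b

theorem pvSorted3 (a b v : Int) (hab : a ≤ b) :
    PySem.List.sorted [a, b, v] (fun w => w) false =
      if v < a then [v, a, b] else if v < b then [a, v, b] else [a, b, v] := by
  split_ifs with h1 h2
  · exact PySem.List.sorted_id_eq_of_perm_of_pairwise _ _
      (by simpa using (List.perm_middle (a := v) (l₁ := [a, b]) (l₂ := ([] : List Int))).symm)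
      (by simp [List.pairwise_cons]; omega)
  · exact PySem.List.sorted_id_eq_of_perm_of_pairwise _ _
      (by have : [a, v, b].Perm [a, b, v] := by
            refine List.Perm.cons a ?_
            exact List.Perm.swap b v []
          exact this)
      (by simp [List.pairwise_cons]; omega)
  · exact PySem.List.sorted_id_eq_of_perm_of_pairwise _ _ (List.Perm.refl _)
      (by simp [List.pairwise_cons]; omega)

theorem pvTwoMinStep_spec (M : List Int) (a b v : Int) (h : pvIsTwoMin M a b) :
    pvIsTwoMin (v :: M) (pvTwoMinStep (a, b) v).1 (pvTwoMinStep (a, b) v).2 := by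
  obtain ⟨rest, hperm, hab, hrest⟩ := h
  have hstep : pvTwoMinStep (a, b) v =
      if v < a then (v, a) else if v < b then (a, v) else (a, b) := by
    unfold pvTwoMinStep
    simp only
    rw [pvSorted3 a b v hab]
    split_ifs with h1 h2 <;>
      simp [PySem.List.pyGetD_ofNat', PySem.List.pyGetD_zero_cons]
  rw [hstep]
  split_ifs with h1 h2
  · refine ⟨b :: rest, List.Perm.cons v hperm, by omega, ?_⟩
    intro w hw
    rcases List.mem_cons.mp hw with h | h
    · omega
    · exact le_trans hab (hrest w h)
  · refine ⟨b :: rest, ?_, by omega, ?_⟩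
    · have : (a :: v :: b :: rest).Perm (v :: a :: b :: rest) := List.Perm.swap v a _
      exact this.trans (List.Perm.cons v hperm)
    · intro w hw; rcases List.mem_cons.mp hw with h | h
      · omega
      · exact le_trans (by omega) (hrest w h)
  · refine ⟨v :: rest, ?_, hab, ?_⟩
    · have h3 : (a :: b :: v :: rest).Perm (v :: a :: b :: rest) := by
        have := List.perm_middle (a := v) (l₁ := [a, b]) (l₂ := rest)
        simpa using this
      exact h3.trans (List.Perm.cons v hperm)
    · intro w hw; rcases List.mem_cons.mp hw with h | h
      · omega
      · exact hrest w h

theorem pvTwoMaxStep_spec (M : List Int) (a b v : Int) (h : pvIsTwoMax M a b) :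
    pvIsTwoMax (v :: M) (pvTwoMaxStep (a, b) v).1 (pvTwoMaxStep (a, b) v).2 := by
  obtain ⟨rest, hperm, hab, hrest⟩ := h
  unfold pvTwoMaxStep
  simp only
  split_ifs with h1 h2
  · refine ⟨b :: rest, List.Perm.cons v hperm, by omega, ?_⟩
    intro w hw
    rcases List.mem_cons.mp hw with h | h
    · omega
    · exact le_trans (hrest w h) hab
  · refine ⟨b :: rest, ?_, by omega, ?_⟩
    · have : (a :: v :: b :: rest).Perm (v :: a :: b :: rest) := List.Perm.swap v a _
      exact this.trans (List.Perm.cons v hperm)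
    · intro w hw; rcases List.mem_cons.mp hw with h | h
      · omega
      · exact le_trans (hrest w h) (by omega)
  · refine ⟨v :: rest, ?_, hab, ?_⟩
    · have h3 : (a :: b :: v :: rest).Perm (v :: a :: b :: rest) := by
        have := List.perm_middle (a := v) (l₁ := [a, b]) (l₂ := rest)
        simpa using this
      exact h3.trans (List.Perm.cons v hperm)
    · intro w hw; rcases List.mem_cons.mp hw with h | h
      · omega
      · exact hrest w h

theorem pvTwoMinFold : ∀ (L M : List Int) (a b : Int), pvIsTwoMin M a b →
    pvIsTwoMin (M ++ L) (L.foldl pvTwoMinStep (a, b)).1 (L.foldl pvTwoMinStep (a, b)).2 := by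
  intro L
  induction L with
  | nil => intro M a b h; simpa using h
  | cons v L ih =>
      intro M a b h
      have h1 := pvTwoMinStep_spec M a b v h
      have h2 := ih (v :: M) _ _ h1
      obtain ⟨rest, hperm, hle, hrest⟩ := h2
      refine ⟨rest, hperm.trans ?_, hle, hrest⟩
      have := List.perm_middle (a := v) (l₁ := M) (l₂ := L)
      exact this.symm

theorem pvTwoMaxFold : ∀ (L M : List Int) (a b : Int), pvIsTwoMax M a b →
    pvIsTwoMax (M ++ L) (L.foldl pvTwoMaxStep (a, b)).1 (L.foldl pvTwoMaxStep (a, b)).2 := by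
  intro L
  induction L with
  | nil => intro M a b h; simpa using h
  | cons v L ih =>
      intro M a b h
      have h1 := pvTwoMaxStep_spec M a b v h
      have h2 := ih (v :: M) _ _ h1
      obtain ⟨rest, hperm, hle, hrest⟩ := h2
      refine ⟨rest, hperm.trans ?_, hle, hrest⟩
      exact (List.perm_middle (a := v) (l₁ := M) (l₂ := L)).symm

theorem pvTwoMin_unique (M : List Int) (a b a' b' : Int)
    (h : pvIsTwoMin M a b) (h' : pvIsTwoMin M a' b') : a = a' ∧ b = b' := by
  obtain ⟨rest, hperm, hab, hrest⟩ := h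
  obtain ⟨rest', hperm', hab', hrest'⟩ := h'
  have hminM : ∀ v ∈ M, a ≤ v := by
    intro v hv
    rcases List.mem_cons.mp (hperm.mem_iff.mpr hv) with h | h
    · omega
    · rcases List.mem_cons.mp h with h | h
      · omega
      · exact le_trans hab (hrest v h)
  have hminM' : ∀ v ∈ M, a' ≤ v := by
    intro v hv
    rcases List.mem_cons.mp (hperm'.mem_iff.mpr hv) with h | h
    · omega
    · rcases List.mem_cons.mp h with h | h
      · omega
      · exact le_trans hab' (hrest' v h)
  have haM : a ∈ M := hperm.mem_iff.mp (by simp)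
  have haM' : a' ∈ M := hperm'.mem_iff.mp (by simp)
  have haa : a = a' := le_antisymm (hminM a' haM') (hminM' a haM)
  subst haa
  have hperm2 : (b :: rest).Perm (b' :: rest') := by
    have := hperm.trans hperm'.symm
    exact this.cons_inv
  have hbmin : ∀ v ∈ b' :: rest', b ≤ v := by
    intro v hv
    rcases List.mem_cons.mp (hperm2.mem_iff.mpr hv) with h | h
    · omega
    · exact hrest v h
  have hbmin' : ∀ v ∈ b :: rest, b' ≤ v := by
    intro v hv
    rcases List.mem_cons.mp (hperm2.mem_iff.mp hv) with h | h
    · omega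
    · exact hrest' v h
  exact ⟨rfl, le_antisymm (hbmin b' (by simp)) (hbmin' b (by simp))⟩
-- ---- assembling the equivalence ----
theorem pv_main : ∀ (points : List (List Int)), points ≠ [] →
    maxActivated points = maxActivated_alt points := by
  intro points hne
  set sp := PySem.List.sorted points (fun p => PySem.List.pyGetD p 0 0) false with hsp
  set n := points.length with hn
  have hn1 : 1 ≤ n := by
    rw [hn]
    cases points with
    | nil => exact absurd rfl hne
    | cons p t => simp
  have hsplen : sp.length = n := by rw [hsp, PySem.List.length_sorted]
  set y0 := PySem.List.pyGetD (PySem.List.pyGetD sp 0 []) 1 0 with hy0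
  set idy0 : PySem.Dict Int Int := PySem.Dict.insert PySem.Dict.empty y0 0 with hidy0
  have hAeq : maxActivated points =
      |((PySem.List.pyRange 0 (n:Int) 1).foldl
          (fun acc j => pvTwoMinStep acc (PySem.List.pyGetD
            ((PySem.List.pyRange 1 (n:Int) 1).foldl (pvStepA sp)
              (List.replicate n (-1), idy0)).1 j 0)) (0, 0)).1 +
       ((PySem.List.pyRange 0 (n:Int) 1).foldl
          (fun acc j => pvTwoMinStep acc (PySem.List.pyGetD
            ((PySem.List.pyRange 1 (n:Int) 1).foldl (pvStepA sp)
              (List.replicate n (-1), idy0)).1 j 0)) (0, 0)).2| + 1 := rfl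
  have hBeq : maxActivated_alt points =
      ((PySem.Dict.values
          ((((PySem.List.pyRange 1 (sp.length:Int) 1).foldl (pvStepB sp)
              (PySem.List.pyRange 0 (sp.length:Int) 1, idy0)).1).foldl
            (fun (d : PySem.Dict Int Int) c => d.insert c (d.getD c 0 + 1))
            PySem.Dict.empty)).foldl pvTwoMaxStep (0, 0)).1 +
      ((PySem.Dict.values
          ((((PySem.List.pyRange 1 (sp.length:Int) 1).foldl (pvStepB sp)
              (PySem.List.pyRange 0 (sp.length:Int) 1, idy0)).1).foldl
            (fun (d : PySem.Dict Int Int) c => d.insert c (d.getD c 0 + 1))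
            PySem.Dict.empty)).foldl pvTwoMaxStep (0, 0)).2 + 1 := rfl
  rw [hsplen] at hBeq
  set stA := (PySem.List.pyRange 1 (n:Int) 1).foldl (pvStepA sp) (List.replicate n (-1), idy0)
    with hstA
  set stB := (PySem.List.pyRange 1 (n:Int) 1).foldl (pvStepB sp)
    (PySem.List.pyRange 0 (n:Int) 1, idy0) with hstB
  have hgood0 : pvGoodDict n idy0 := by
    intro kv hkv
    rw [hidy0, PySem.Dict.mem_items_insert] at hkv
    rcases hkv with h | ⟨h, _⟩
    · rw [h]; constructor
      · simp
      · simp; omega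
    · exact absurd h (by simp [PySem.Dict.empty, PySem.Dict.items])
  have hloop := pvLoop (n := n) sp (PySem.List.pyRange 1 (n:Int) 1)
    (fun i hi => by
      have := PySem.List.mem_pyRange_one.mp hi
      exact ⟨this.1, this.2⟩)
    (List.replicate n (-1)) (PySem.List.pyRange 0 (n:Int) 1) idy0 (pvInit n) hgood0
  obtain ⟨hIF, -, -⟩ := hloop
  rw [← hstA, ← hstB] at hIF
  set parentF := stA.1 with hpF
  set compF := stB.1 with hcF
  -- A's final fold over the parent array
  have hfoldA : (PySem.List.pyRange 0 (n:Int) 1).foldl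
      (fun acc j => pvTwoMinStep acc (PySem.List.pyGetD parentF j 0)) (0, 0) =
      parentF.foldl pvTwoMinStep (0, 0) := by
    rw [← hIF.lenp]
    exact PySem.List.foldl_pyRange_zero_pyGetD' parentF 0 pvTwoMinStep (0, 0)
  -- B's counting dict is Counter(comp)
  have hsizes : compF.foldl
      (fun (d : PySem.Dict Int Int) c => d.insert c (d.getD c 0 + 1)) PySem.Dict.empty =
      PySem.Dict.counter compF := PySem.Dict.foldl_insert_getD_add_one_eq_counter compF
  have hvals : PySem.Dict.values (PySem.Dict.counter compF) =
      (PySem.Set.ofList compF).map (fun k => (List.count k compF : Int)) := by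
    show (PySem.Dict.counter compF).items.map (fun p => p.2) = _
    rw [PySem.Dict.items_counter, List.map_map]
    rfl
  set values := (PySem.Set.ofList compF).map (fun k => (List.count k compF : Int)) with hvdef
  have hmax := pvTwoMaxFold values [0, 0] 0 0 ⟨[], List.Perm.refl _, le_refl 0, by simp⟩
  set s1 := (values.foldl pvTwoMaxStep (0, 0)).1 with hs1
  set s2 := (values.foldl pvTwoMaxStep (0, 0)).2 with hs2
  set idxs := PySem.List.pyRange 0 (n:Int) 1 with hidxs
  set isRoot := (fun r : Int => decide (pvEntry parentF r < 0)) with hisRoot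
  set roots := idxs.filter isRoot with hroots
  set nonroots := idxs.filter (fun x => !isRoot x) with hnonroots
  have hmemroots : ∀ r ∈ roots, (0 ≤ r ∧ r < (n:Int)) ∧ pvEntry parentF r < 0 := by
    intro r hr
    rw [hroots, List.mem_filter] at hr
    refine ⟨PySem.List.mem_pyRange_one.mp hr.1, ?_⟩
    have := hr.2
    rw [hisRoot] at this
    exact of_decide_eq_true this
  have hmemnon : ∀ r ∈ nonroots, 0 ≤ pvEntry parentF r := by
    intro r hr
    rw [hnonroots, List.mem_filter] at hr
    have := hr.2
    rw [hisRoot] at this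
    simp at this
    omega
  have hsplit : (roots ++ nonroots).Perm idxs := List.filter_append_perm _ _
  have hidmap : idxs.map (fun j => PySem.List.pyGetD parentF j 0) = parentF := by
    rw [hidxs, ← hIF.lenp]
    exact PySem.List.map_pyGetD_pyRange_zero' parentF 0
  have hpermP : (roots.map (fun j => PySem.List.pyGetD parentF j 0) ++
      nonroots.map (fun j => PySem.List.pyGetD parentF j 0)).Perm parentF := by
    have h := hsplit.map (fun j => PySem.List.pyGetD parentF j 0)
    rw [hidmap, List.map_append] at h
    exact h
  have hlabperm : (roots.map (pvLab compF)).Perm (PySem.Set.ofList compF) := by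
    rw [List.perm_ext_iff_of_nodup
      (List.Nodup.map_on ?inj ((PySem.List.nodup_pyRange_one 0 (n:Int)).filter _))
      (PySem.Set.nodup_ofList compF)]
    case inj =>
      intro x hx y hy hxy
      obtain ⟨⟨hx0, hx1⟩, hxr⟩ := hmemroots x hx
      obtain ⟨⟨hy0, hy1⟩, hyr⟩ := hmemroots y hy
      exact hIF.inj x y hx0 hx1 hy0 hy1 hxr hyr hxy
    intro l
    constructor
    · intro hl
      obtain ⟨r, hr, hrl⟩ := List.mem_map.mp hl
      obtain ⟨⟨hr0, hr1⟩, _⟩ := hmemroots r hr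
      rw [PySem.Set.mem_ofList]
      rw [← hrl]
      exact pvLab_mem compF r hr0 (by rw [hIF.lenc]; exact hr1)
    · intro hl
      rw [PySem.Set.mem_ofList] at hl
      obtain ⟨k, hk, hkl⟩ := List.getElem_of_mem hl
      have hk0 : (0:Int) ≤ (k:Int) := by omega
      have hk1 : (k:Int) < (n:Int) := by
        have := hIF.lenc; omega
      have hlabk : pvLab compF (k:Int) = l := by
        unfold pvLab
        rw [pvGetD_nonneg_eq _ _ hk0, Int.toNat_natCast, List.getD_eq_getElem?_getD,
          List.getElem?_eq_getElem hk, hkl]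
        rfl
      obtain ⟨hroot, hr0, hr1, hrlab⟩ := pvF_root hIF (k:Int) hk0 hk1
      refine List.mem_map.mpr ⟨pvF parentF (k:Int), ?_, by rw [hrlab, hlabk]⟩
      refine List.mem_filter.mpr ⟨PySem.List.mem_pyRange_one.mpr ⟨hr0, hr1⟩, ?_⟩
      rw [hisRoot]
      exact decide_eq_true hroot
  have hroots_entry : roots.map (fun j => PySem.List.pyGetD parentF j 0) =
      (roots.map (pvLab compF)).map (fun l => -(List.count l compF : Int)) := by
    rw [List.map_map]
    refine List.map_congr_left ?_
    intro r hr
    obtain ⟨⟨hr0, hr1⟩, hrr⟩ := hmemroots r hr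
    exact hIF.size r hr0 hr1 hrr
  have hnegperm : (values.map (fun v => -v)).Perm
      (roots.map (fun j => PySem.List.pyGetD parentF j 0)) := by
    rw [hroots_entry, hvdef, List.map_map]
    exact (hlabperm.map (fun l => -(List.count l compF : Int))).symm
  obtain ⟨restB, hpB, hleB, hrB⟩ := hmax
  have hvalnn : ∀ v ∈ (0:Int) :: (0:Int) :: values, 0 ≤ v := by
    intro v hv
    rcases List.mem_cons.mp hv with h | h
    · omega
    · rcases List.mem_cons.mp h with h | h
      · omega
      · obtain ⟨k, _, hk⟩ := List.mem_map.mp h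
        rw [← hk]; positivity
  have hs1nn : 0 ≤ s1 := hvalnn s1 (hpB.mem_iff.mp (by simp))
  have hs2nn : 0 ≤ s2 := hvalnn s2 (hpB.mem_iff.mp (by simp))
  have hminB : pvIsTwoMin ([0, 0] ++ parentF) (-s1) (-s2) := by
    refine ⟨restB.map (fun v => -v) ++ nonroots.map (fun j => PySem.List.pyGetD parentF j 0),
      ?_, by omega, ?_⟩
    · have step1 : ((-s1) :: (-s2) :: restB.map (fun v => -v)).Perm
          ((0:Int) :: (0:Int) :: values.map (fun v => -v)) := by
        have := hpB.map (fun v : Int => -v)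
        simpa using this
      have step2 : (((-s1) :: (-s2) :: restB.map (fun v => -v)) ++
          nonroots.map (fun j => PySem.List.pyGetD parentF j 0)).Perm
          (((0:Int) :: (0:Int) :: values.map (fun v => -v)) ++
          nonroots.map (fun j => PySem.List.pyGetD parentF j 0)) :=
        step1.append_right _
      refine List.Perm.trans (by simpa using step2) ?_
      show ((0:Int) :: (0:Int) :: (values.map (fun v => -v) ++ _)).Perm _
      refine List.Perm.cons 0 (List.Perm.cons 0 ?_)
      exact ((hnegperm.append_right _).trans hpermP)
    · intro v hv
      rcases List.mem_append.mp hv with h | h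
      · obtain ⟨w, hw, hwv⟩ := List.mem_map.mp h
        have := hrB w hw
        omega
      · obtain ⟨r, hr, hrv⟩ := List.mem_map.mp h
        have := hmemnon r hr
        unfold pvEntry at this
        omega
  have hminA := pvTwoMinFold parentF [0, 0] 0 0 ⟨[], List.Perm.refl _, le_refl 0, by simp⟩
  obtain ⟨ha, hb⟩ := pvTwoMin_unique ([0, 0] ++ parentF) _ _ _ _ hminA hminB
  rw [hAeq, hBeq, hsizes, hvals, ← hs1, ← hs2, hfoldA, ha, hb]
  rw [abs_of_nonpos (by omega)]
  omega
-- ===== VERDICT (by name: the statement is the Claim_ definition above) =====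
theorem maxActivated_spec : Claim_equal_maxActivated := by
  intro points _ hpre
  exact pv_main points hpre.1
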